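-- pv_equiv track=rewrite | github.com/allenshie/smart-retail | src/utils/utils.py | get_minimum_enclosing_bbox
-- ===== SOURCE A (Python) =====
-- def get_minimum_enclosing_bbox(bboxes):
--     """
--     計算包圍所有 bboxes 的最小矩形
--
--     :param bboxes: List of bboxes, each bbox in format [x1, y1, x2, y2]
--     :return: Minimum enclosing bbox in format [x_min, y_min, x_max, y_max]
--     """
--     if not bboxes:
--         raise ValueError("The list of bboxes is empty")
--
--     # 分別計算 x_min, y_min, x_max, y_max
--     x_min = min(bbox[0] for bbox in bboxes)
--     y_min = min(bbox[1] for bbox in bboxes)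
--     x_max = max(bbox[2] for bbox in bboxes)
--     y_max = max(bbox[3] for bbox in bboxes)
--
--     return [x_min, y_min, x_max, y_max]
-- ===== SOURCE B (Python) =====
-- def get_minimum_enclosing_bbox(bboxes):
--     if not bboxes:
--         raise ValueError("The list of bboxes is empty")
--     x_min, y_min, x_max, y_max = bboxes[0][0], bboxes[0][1], bboxes[0][2], bboxes[0][3]
--     for b in bboxes[1:]:
--         x_min = b[0] if b[0] < x_min else x_min
--         y_min = b[1] if b[1] < y_min else y_min
--         x_max = b[2] if b[2] > x_max else x_max
--         y_max = b[3] if b[3] > y_max else y_max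
--     return [x_min, y_min, x_max, y_max]
-- ===== Notes on version B (the rewrite author's own statement) =====
-- stated objective: alternative
-- what changed: Replaces four separate min/max generator passes with one combined pass maintaining four running extrema seeded from the first bbox.
import Mathlib
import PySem

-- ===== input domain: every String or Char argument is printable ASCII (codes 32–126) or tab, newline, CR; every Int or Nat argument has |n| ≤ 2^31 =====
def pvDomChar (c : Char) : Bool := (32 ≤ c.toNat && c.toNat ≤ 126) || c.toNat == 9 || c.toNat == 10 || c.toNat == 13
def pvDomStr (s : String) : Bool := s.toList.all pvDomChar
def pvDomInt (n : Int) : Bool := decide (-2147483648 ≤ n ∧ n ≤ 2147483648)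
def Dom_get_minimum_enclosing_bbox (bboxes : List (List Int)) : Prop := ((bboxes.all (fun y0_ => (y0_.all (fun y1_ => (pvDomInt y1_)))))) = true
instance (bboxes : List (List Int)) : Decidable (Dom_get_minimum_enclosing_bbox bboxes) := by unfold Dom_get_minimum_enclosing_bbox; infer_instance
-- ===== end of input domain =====

-- B fuses A's four separate min/max passes into one loop over the tail with four running extrema (alternative decomposition, same cost).


-- ===== PORT A =====
-- bbox[i] inside Pre_ (every bbox has ≥ 4 entries, indices 0..3): pyGet? … |>.getD 0, default unreachable
def get_minimum_enclosing_bbox (bboxes : List (List Int)) : List Int :=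
  match bboxes with
  | [] => []  -- A raises ValueError here; excluded by Pre_
  | _ :: _ =>
    let x_min := (PySem.List.min? (bboxes.map (fun b => (PySem.List.pyGet? b 0).getD 0)) (fun x => x)).getD 0
    let y_min := (PySem.List.min? (bboxes.map (fun b => (PySem.List.pyGet? b 1).getD 0)) (fun x => x)).getD 0
    let x_max := (PySem.List.max? (bboxes.map (fun b => (PySem.List.pyGet? b 2).getD 0)) (fun x => x)).getD 0
    let y_max := (PySem.List.max? (bboxes.map (fun b => (PySem.List.pyGet? b 3).getD 0)) (fun x => x)).getD 0
    [x_min, y_min, x_max, y_max]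

-- ===== PORT B =====
def get_minimum_enclosing_bbox_alt (bboxes : List (List Int)) : List Int :=
  match bboxes with
  | [] => []  -- B raises ValueError here; excluded by Pre_
  | b :: rest =>
    let s := rest.foldl
      (fun (s : Int × Int × Int × Int) bb =>
        let x0 := (PySem.List.pyGet? bb 0).getD 0
        let y0 := (PySem.List.pyGet? bb 1).getD 0
        let x1 := (PySem.List.pyGet? bb 2).getD 0
        let y1 := (PySem.List.pyGet? bb 3).getD 0
        (if x0 < s.1 then x0 else s.1,
         if y0 < s.2.1 then y0 else s.2.1,
         if x1 > s.2.2.1 then x1 else s.2.2.1,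
         if y1 > s.2.2.2 then y1 else s.2.2.2))
      ((PySem.List.pyGet? b 0).getD 0, (PySem.List.pyGet? b 1).getD 0,
       (PySem.List.pyGet? b 2).getD 0, (PySem.List.pyGet? b 3).getD 0)
    [s.1, s.2.1, s.2.2.1, s.2.2.2]

-- ===== PRECONDITION & SPEC =====
-- Pre_ excludes the empty list (A raises ValueError) and lists containing a bbox with fewer than 4 entries (A raises IndexError); B raises there too.
def Pre_get_minimum_enclosing_bbox (bboxes : List (List Int)) : Prop :=
  bboxes ≠ [] ∧ ∀ b ∈ bboxes, 4 ≤ b.length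
instance (bboxes : List (List Int)) : Decidable (Pre_get_minimum_enclosing_bbox bboxes) := by unfold Pre_get_minimum_enclosing_bbox; infer_instance
def pvWitness_get_minimum_enclosing_bbox : List (List Int) := [[0, 1, 2, 3], [-1, 5, 7, 2]]

def Spec_get_minimum_enclosing_bbox (bboxes : List (List Int)) (out : List Int) : Prop := out = get_minimum_enclosing_bbox_alt bboxes
instance (bboxes : List (List Int)) (out : List Int) : Decidable (Spec_get_minimum_enclosing_bbox bboxes out) := by unfold Spec_get_minimum_enclosing_bbox; infer_instance

-- ===== CLAIM (what is proved, stated in full; the proofs are below) =====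
def Claim_equal_get_minimum_enclosing_bbox : Prop := ∀ (bboxes : List (List Int)), Dom_get_minimum_enclosing_bbox bboxes → Pre_get_minimum_enclosing_bbox bboxes → Spec_get_minimum_enclosing_bbox bboxes (get_minimum_enclosing_bbox bboxes)

-- ===== LEMMAS AND PROOFS =====
-- B's fused fold computes, componentwise, the four running min/max folds.
theorem pv_fold4 (rest : List (List Int)) (a0 a1 a2 a3 : Int) :
    rest.foldl
      (fun (s : Int × Int × Int × Int) bb =>
        let x0 := (PySem.List.pyGet? bb 0).getD 0
        let y0 := (PySem.List.pyGet? bb 1).getD 0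
        let x1 := (PySem.List.pyGet? bb 2).getD 0
        let y1 := (PySem.List.pyGet? bb 3).getD 0
        (if x0 < s.1 then x0 else s.1,
         if y0 < s.2.1 then y0 else s.2.1,
         if x1 > s.2.2.1 then x1 else s.2.2.1,
         if y1 > s.2.2.2 then y1 else s.2.2.2))
      (a0, a1, a2, a3)
    = ((rest.map (fun b => (PySem.List.pyGet? b 0).getD 0)).foldl min a0,
       (rest.map (fun b => (PySem.List.pyGet? b 1).getD 0)).foldl min a1,
       (rest.map (fun b => (PySem.List.pyGet? b 2).getD 0)).foldl max a2,
       (rest.map (fun b => (PySem.List.pyGet? b 3).getD 0)).foldl max a3) := by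
  induction rest generalizing a0 a1 a2 a3 with
  | nil => rfl
  | cons bb t ih =>
    simp only [List.foldl_cons, List.map_cons]
    have h0 : (if (PySem.List.pyGet? bb 0).getD 0 < a0 then (PySem.List.pyGet? bb 0).getD 0 else a0) = min a0 ((PySem.List.pyGet? bb 0).getD 0) := by
      rw [min_def]; split_ifs <;> omega
    have h1 : (if (PySem.List.pyGet? bb 1).getD 0 < a1 then (PySem.List.pyGet? bb 1).getD 0 else a1) = min a1 ((PySem.List.pyGet? bb 1).getD 0) := by
      rw [min_def]; split_ifs <;> omega
    have h2 : (if (PySem.List.pyGet? bb 2).getD 0 > a2 then (PySem.List.pyGet? bb 2).getD 0 else a2) = max a2 ((PySem.List.pyGet? bb 2).getD 0) := by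
      rw [max_def]; split_ifs <;> omega
    have h3 : (if (PySem.List.pyGet? bb 3).getD 0 > a3 then (PySem.List.pyGet? bb 3).getD 0 else a3) = max a3 ((PySem.List.pyGet? bb 3).getD 0) := by
      rw [max_def]; split_ifs <;> omega
    rw [h0, h1, h2, h3]
    exact ih _ _ _ _

-- ===== VERDICT (by name: the statement is the Claim_ definition above) =====
theorem get_minimum_enclosing_bbox_spec : Claim_equal_get_minimum_enclosing_bbox := by
  intro bboxes _ hpre
  unfold Spec_get_minimum_enclosing_bbox
  match bboxes with
  | [] => exact absurd rfl hpre.1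
  | b :: rest =>
    simp only [get_minimum_enclosing_bbox, get_minimum_enclosing_bbox_alt,
      List.map_cons, PySem.List.min?_id_cons, PySem.List.max?_id_cons, Option.getD_some,
      pv_fold4]
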